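-- pv_equiv track=rewrite | github.com/niloofarzolfigol/calculator | calculator_by_NZ.py | insert_multiply_before_left_paren
-- ===== SOURCE A (Python) =====
-- def insert_multiply_before_left_paren(current):
--     """ 3(1+2) => 3*(1+2) """
--     current = list(current)
--     i = 0
--     while i < len(current):
--         if current[i] == '(' and (current[i-1] not in ['/', '+', '-', '*', '(']):
--             current.insert(i, '*')
--             i += 1
--         i += 1
--     if current[0] == '*':
--         current.pop(0)
--     current = ''.join(current)
--     return current
-- ===== SOURCE B (Python) =====
-- def insert_multiply_before_left_paren(current):
--     """ 3(1+2) => 3*(1+2) """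
--     out = []
--     prev = None
--     for ch in current:
--         if ch == '(' and prev is not None and prev not in '/+-*(':
--             out.append('*')
--         out.append(ch)
--         prev = ch
--     return ''.join(out)
-- ===== Notes on version B (the rewrite author's own statement) =====
-- stated objective: simpler
-- what changed: Replaces A's in-place while-loop that mutates the list with insert() and re-indexes (plus a final pop of a leading '*') by a single forward pass that tracks the previous character and emits '*' before qualifying '(' while building the output.
-- intended difference: On inputs whose first character is '*', A's final current[0]=='*' pop deletes that input star and returns the string without it, while B keeps it; B is intended because the function's purpose is only to insert multiplication signs, never to delete characters the user typed. — e.g. on insert_multiply_before_left_paren("*2"): A returns "2", B returns "*2"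
import Mathlib
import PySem

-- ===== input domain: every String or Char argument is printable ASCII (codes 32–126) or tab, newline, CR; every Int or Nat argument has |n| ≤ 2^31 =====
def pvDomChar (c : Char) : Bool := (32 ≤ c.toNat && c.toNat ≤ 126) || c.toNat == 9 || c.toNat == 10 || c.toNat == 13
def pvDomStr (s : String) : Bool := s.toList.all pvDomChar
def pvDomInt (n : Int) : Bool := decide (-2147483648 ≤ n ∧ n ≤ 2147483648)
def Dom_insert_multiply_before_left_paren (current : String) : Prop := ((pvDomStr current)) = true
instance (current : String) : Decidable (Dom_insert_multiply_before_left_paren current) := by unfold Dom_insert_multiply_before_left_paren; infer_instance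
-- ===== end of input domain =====

-- B replaces A's mutate-and-reindex while loop by one forward pass tracking the previous
-- character (objective: simpler); B intentionally keeps an input-leading '*' that A pops (D_ below).

-- ===== PORT A =====
-- literal port of A's while loop: i steps over the evolving list, list.insert/pop as in Python;
-- current[i-1] is PySem.List.pyGetD (in range whenever i < len, so the default is never used)
def pvLoopA (cur : List Char) (i : Nat) : List Char :=
  if h : i < cur.length then
    if PySem.List.pyGetD cur (i : Int) ' ' = '(' ∧
       PySem.List.pyGetD cur ((i : Int) - 1) ' ' ∉ (['/', '+', '-', '*', '('] : List Char) then
      pvLoopA (PySem.List.insert cur (i : Int) '*') (i + 2)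
    else
      pvLoopA cur (i + 1)
  else cur
termination_by cur.length - i
decreasing_by
  · simp only [PySem.List.length_insert]; omega
  · omega

def insert_multiply_before_left_paren (current : String) : String :=
  let cur := pvLoopA current.toList 0
  -- Python: if current[0] == '*': current.pop(0)  (current[0] raises IndexError on []; Pre_ excludes "")
  let cur := if cur.head? = some '*' then cur.tail else cur
  String.ofList cur

-- ===== PORT B =====
def pvPrevOk : Option Char → Bool
  | some p => !((['/', '+', '-', '*', '('] : List Char).contains p)
  | none => false

def pvStepB (st : List Char × Option Char) (ch : Char) : List Char × Option Char :=
  (st.1 ++ (if ch = '(' && pvPrevOk st.2 then ['*', ch] else [ch]), some ch)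

def insert_multiply_before_left_paren_alt (current : String) : String :=
  String.ofList ((current.toList.foldl pvStepB ([], none)).1)

-- ===== PRECONDITION & SPEC =====
-- Pre_ excludes only the empty string, on which A raises IndexError at current[0]
def Pre_insert_multiply_before_left_paren (current : String) : Prop := current ≠ ""
instance (current : String) : Decidable (Pre_insert_multiply_before_left_paren current) := by
  unfold Pre_insert_multiply_before_left_paren; infer_instance
def pvWitness_insert_multiply_before_left_paren : String := "3(1+2)"

-- On inputs whose first character is '*', A's final current[0]=='*' pop deletes that input star
-- and returns the rest, while B keeps it; B is intended: the function should only insert '*',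
-- never delete characters the user typed.
def D_insert_multiply_before_left_paren (current : String) : Prop :=
  current.toList.head? = some '*'
instance (current : String) : Decidable (D_insert_multiply_before_left_paren current) := by
  unfold D_insert_multiply_before_left_paren; infer_instance

def Spec_insert_multiply_before_left_paren (current : String) (out : String) : Prop :=
  ¬ D_insert_multiply_before_left_paren current → out = insert_multiply_before_left_paren_alt current
instance (current : String) (out : String) : Decidable (Spec_insert_multiply_before_left_paren current out) := by
  unfold Spec_insert_multiply_before_left_paren; infer_instance

def pvDiffWitness_insert_multiply_before_left_paren : String := "*2"
def pvDiffWitnessOut_insert_multiply_before_left_paren : String × String := ("2", "*2")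

-- ===== CLAIM (what is proved, stated in full; the proofs are below) =====
def Claim_unchanged_insert_multiply_before_left_paren : Prop := ∀ (current : String), Dom_insert_multiply_before_left_paren current → Pre_insert_multiply_before_left_paren current → Spec_insert_multiply_before_left_paren current (insert_multiply_before_left_paren current)
def Claim_changed_insert_multiply_before_left_paren : Prop := Dom_insert_multiply_before_left_paren (pvDiffWitness_insert_multiply_before_left_paren) ∧ Pre_insert_multiply_before_left_paren (pvDiffWitness_insert_multiply_before_left_paren) ∧ D_insert_multiply_before_left_paren (pvDiffWitness_insert_multiply_before_left_paren) ∧ insert_multiply_before_left_paren (pvDiffWitness_insert_multiply_before_left_paren) = pvDiffWitnessOut_insert_multiply_before_left_paren.1 ∧ insert_multiply_before_left_paren_alt (pvDiffWitness_insert_multiply_before_left_paren) = pvDiffWitnessOut_insert_multiply_before_left_paren.2 ∧ pvDiffWitnessOut_insert_multiply_before_left_paren.1 ≠ pvDiffWitnessOut_insert_multiply_before_left_paren.2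
def Claim_exact_insert_multiply_before_left_paren : Prop := ∀ (current : String), Dom_insert_multiply_before_left_paren current → Pre_insert_multiply_before_left_paren current → D_insert_multiply_before_left_paren current → insert_multiply_before_left_paren current ≠ insert_multiply_before_left_paren_alt current

-- ===== LEMMAS AND PROOFS =====

-- the common one-pass semantics both programs compute (modulo A's head pop):
-- pvG prev l inserts '*' before each '(' in l whose predecessor is not an operator/open paren
def pvG (prev : Char) : List Char → List Char
  | [] => []
  | c :: rest =>
      (if c = '(' ∧ prev ∉ (['/', '+', '-', '*', '('] : List Char) then ['*', c] else [c]) ++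
        pvG c rest

theorem pvFoldB_eq (l : List Char) : ∀ (acc : List Char) (p : Char),
    (l.foldl pvStepB (acc, some p)).1 = acc ++ pvG p l := by
  induction l with
  | nil => intro acc p; simp [pvG]
  | cons c rest ih =>
      intro acc p
      by_cases h : c = '(' ∧ p ∉ (['/', '+', '-', '*', '('] : List Char) <;>
        simp [pvStepB, pvPrevOk, pvG, h, ih, List.contains_eq_mem]

theorem pvGetD_mid {α : Type} (pre suf : List α) (x d : α) :
    (pre ++ x :: suf).getD pre.length d = x := by
  simp [List.getD]

theorem pvTake_len_append {α : Type} (pre suf : List α) :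
    (pre ++ suf).take pre.length = pre := by simp

theorem pvDrop_len_append {α : Type} (pre suf : List α) :
    (pre ++ suf).drop pre.length = suf := by simp

theorem pvLoopA_spec : ∀ (n : Nat) (cur : List Char) (i : Nat), cur.length - i = n →
    1 ≤ i → i ≤ cur.length →
    pvLoopA cur i = cur.take i ++ pvG (cur.getD (i - 1) ' ') (cur.drop i) := by
  intro n
  induction n using Nat.strong_induction_on with
  | _ n ih =>
    intro cur i hn h1 hle
    rcases Nat.lt_or_ge i cur.length with hlt | hge
    · -- i < cur.length : one loop iteration
      have hi1 : i - 1 < cur.length := by omega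
      have hprev : PySem.List.pyGetD cur ((i : Int) - 1) ' ' = cur.getD (i - 1) ' ' := by
        have : ((i : Int) - 1) = ((i - 1 : Nat) : Int) := by omega
        rw [this, PySem.List.pyGetD_natCast]
      have hcur : PySem.List.pyGetD cur (i : Int) ' ' = cur[i] := by
        rw [PySem.List.pyGetD_natCast]; simp [List.getD, hlt]
      have hdrop : cur.drop i = cur[i] :: cur.drop (i + 1) := List.drop_eq_getElem_cons hlt
      rw [pvLoopA]
      simp only [hlt, dif_pos, hprev, hcur]
      by_cases hc : cur[i] = '(' ∧ cur.getD (i - 1) ' ' ∉ (['/', '+', '-', '*', '('] : List Char)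
      · rw [if_pos hc]
        have hins : PySem.List.insert cur (i : Int) '*' =
            cur.take i ++ '*' :: cur.drop i :=
          PySem.List.insert_natCast cur i '*' (le_of_lt hlt)
        set cur' : List Char := cur.take i ++ '*' :: cur[i] :: cur.drop (i + 1) with hcur'
        have hins' : PySem.List.insert cur (i : Int) '*' = cur' := by rw [hins, hdrop]
        have hlen' : cur'.length = cur.length + 1 := by
          simp [hcur']
        have hlentake : (cur.take i).length = i := by simp; omega
        have hrec := ih (cur.length - i - 1) (by omega) cur' (i + 2)
          (by omega) (by omega) (by omega)
        rw [hins', hrec]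
        have e1 : cur' = (cur.take i ++ ['*', cur[i]]) ++ cur.drop (i + 1) := by
          simp [hcur']
        have e1len : (cur.take i ++ ['*', cur[i]]).length = i + 2 := by
          simp [hlentake]
        have htake2 : cur'.take (i + 2) = cur.take i ++ ['*', cur[i]] := by
          rw [e1, ← e1len, pvTake_len_append]
        have hdrop2 : cur'.drop (i + 2) = cur.drop (i + 1) := by
          rw [e1, ← e1len, pvDrop_len_append]
        have e2 : cur' = (cur.take i ++ ['*']) ++ cur[i] :: cur.drop (i + 1) := by
          simp [hcur']
        have e2len : (cur.take i ++ ['*']).length = i + 1 := by simp [hlentake]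
        have hget1 : cur'.getD (i + 2 - 1) ' ' = cur[i] := by
          have h21 : i + 2 - 1 = i + 1 := by omega
          rw [h21, e2, ← e2len, pvGetD_mid]
        rw [htake2, hget1, hdrop2, hdrop, pvG]
        rw [if_pos hc]
        simp
      · rw [if_neg hc]
        have hrec := ih (cur.length - i - 1) (by omega) cur (i + 1)
          (by omega) (by omega) (by omega)
        have htake : cur.take (i + 1) = cur.take i ++ [cur[i]] := by
          rw [List.take_add_one]
          simp [hlt]
        have hget : cur.getD (i + 1 - 1) ' ' = cur[i] := by
          simp [List.getD, hlt]
        rw [hrec, hget, htake, hdrop, pvG, if_neg hc]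
        simp only [List.singleton_append, List.append_assoc]
    · -- i ≥ cur.length : loop ends
      have hi : i = cur.length := by omega
      subst hi
      rw [pvLoopA]
      simp [pvG]

-- A on a nonempty string, before the final pop: the loop result is a :: pvG a rest
theorem pvLoopA_zero (a : Char) (rest : List Char) :
    pvLoopA (a :: rest) 0 = a :: pvG a rest ∨
    (a = '(' ∧ pvLoopA (a :: rest) 0 = '*' :: a :: pvG a rest) := by
  have hlen : 0 < (a :: rest).length := by simp
  have hlast : (a :: rest) ≠ [] := by simp
  rw [pvLoopA]
  simp only [hlen, dif_pos]
  have hcur : PySem.List.pyGetD (a :: rest) ((0 : Nat) : Int) ' ' = a := by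
    rw [PySem.List.pyGetD_natCast]; rfl
  have hneg : ((0 : Nat) : Int) - 1 = (-1 : Int) := by norm_num
  by_cases hc : PySem.List.pyGetD (a :: rest) (((0 : Nat) : Int) - 1) ' ' ∈
      (['/', '+', '-', '*', '('] : List Char)
  · -- previous (= last, via -1 wraparound) is an operator: no insert at 0
    left
    rw [if_neg (fun hand => hand.2 hc)]
    have := pvLoopA_spec ((a :: rest).length - 1) (a :: rest) 1 rfl (by omega) (by simp)
    rw [this]
    simp [List.getD]
  · by_cases ha : a = '('
    · -- '(' at index 0 with non-operator last char: '*' inserted at the front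
      right
      refine ⟨ha, ?_⟩
      rw [if_pos ⟨by rw [hcur]; exact ha, hc⟩]
      have hins : PySem.List.insert (a :: rest) ((0 : Nat) : Int) '*' = '*' :: a :: rest :=
        PySem.List.insert_natCast (a :: rest) 0 '*' (by simp)
      rw [hins]
      have := pvLoopA_spec (('*' :: a :: rest).length - 2) ('*' :: a :: rest) 2 rfl
        (by omega) (by simp)
      rw [this]
      subst ha
      simp [List.getD]
    · left
      rw [if_neg (by rw [hcur]; intro h; exact ha h.1)]
      have := pvLoopA_spec ((a :: rest).length - 1) (a :: rest) 1 rfl (by omega) (by simp)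
      rw [this]
      simp [List.getD]

-- A's full result on a nonempty input
theorem pvA_char (a : Char) (rest : List Char) :
    insert_multiply_before_left_paren (String.ofList (a :: rest)) =
      String.ofList (if a = '*' then pvG a rest else a :: pvG a rest) := by
  unfold insert_multiply_before_left_paren
  have htl : (String.ofList (a :: rest)).toList = a :: rest := by simp
  rw [htl]
  rcases pvLoopA_zero a rest with h | ⟨ha, h⟩
  · rw [h]
    by_cases hstar : a = '*'
    · simp [hstar]
    · simp [hstar]
  · rw [h, ha]
    simp

-- B's full result on a nonempty input
theorem pvB_char (a : Char) (rest : List Char) :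
    insert_multiply_before_left_paren_alt (String.ofList (a :: rest)) =
      String.ofList (a :: pvG a rest) := by
  unfold insert_multiply_before_left_paren_alt
  have htl : (String.ofList (a :: rest)).toList = a :: rest := by simp
  rw [htl]
  simp only [List.foldl_cons]
  have hstep : pvStepB ([], none) a = ([a], some a) := by simp [pvStepB, pvPrevOk]
  rw [hstep, pvFoldB_eq rest [a] a]
  rfl

-- ===== VERDICT (by name: the statement is the Claim_ definition above) =====
theorem insert_multiply_before_left_paren_spec : Claim_unchanged_insert_multiply_before_left_paren := by
  intro current _ hpre hnd
  have hne : current.toList ≠ [] := by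
    intro h
    have h2 := congrArg String.ofList h
    simp at h2
    exact hpre h2
  obtain ⟨a, rest, hal⟩ := List.exists_cons_of_ne_nil hne
  have hcur : current = String.ofList (a :: rest) := by
    rw [← hal]; simp
  have hstar : a ≠ '*' := by
    intro h
    apply hnd
    unfold D_insert_multiply_before_left_paren
    rw [hal, h]
    rfl
  unfold Spec_insert_multiply_before_left_paren at *
  rw [hcur, pvA_char, pvB_char, if_neg hstar]

theorem insert_multiply_before_left_paren_changed : Claim_changed_insert_multiply_before_left_paren := by
  unfold Claim_changed_insert_multiply_before_left_paren
  refine ⟨by decide, by decide, by decide, ?_, ?_, by decide⟩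
  · have : pvDiffWitness_insert_multiply_before_left_paren = String.ofList ('*' :: ['2']) := by decide
    rw [this, pvA_char]
    decide
  · have : pvDiffWitness_insert_multiply_before_left_paren = String.ofList ('*' :: ['2']) := by decide
    rw [this, pvB_char]
    decide

theorem insert_multiply_before_left_paren_tight : Claim_exact_insert_multiply_before_left_paren := by
  intro current _ _ hd
  unfold D_insert_multiply_before_left_paren at hd
  obtain ⟨a, rest, hal⟩ : ∃ a rest, current.toList = a :: rest := by
    cases h : current.toList with
    | nil => rw [h] at hd; simp at hd
    | cons a rest => exact ⟨a, rest, rfl⟩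
  have ha : a = '*' := by rw [hal] at hd; simpa using hd
  have hcur : current = String.ofList (a :: rest) := by rw [← hal]; simp
  rw [hcur, pvA_char, pvB_char, if_pos ha]
  intro h
  have := congrArg (fun s => s.toList.length) h
  simp at this
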